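-- pv_equiv track=rewrite | github.com/MCThanos/python_code | 密码学/密码1.py | unlock_methog
-- ===== SOURCE A (Python) =====
-- def unlock_methog(a, b, c):
--     ani = 0
--     for i in range(1, 26):
--         if ((i * a - 1) % 26 == 0):
--             ani = i
--             break
--     number = ord(c) - 97
--     result1 = (ani * (number - b)) % 26
--     result2 = chr(result1 + 97)
--     return result2
-- ===== SOURCE B (Python) =====
-- def unlock_methog(a, b, c):
--     # extended Euclid on (a % 26, 26) gives the modular inverse constructively
--     old_r, r = a % 26, 26
--     old_s, s = 1, 0
--     while r != 0:
--         q = old_r // r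
--         old_r, r = r, old_r - q * r
--         old_s, s = s, old_s - q * s
--     ani = old_s % 26 if old_r == 1 else 0
--     return chr((ani * (ord(c) - 97 - b)) % 26 + 97)
-- ===== Notes on version B (the rewrite author's own statement) =====
-- stated objective: alternative
-- what changed: Replaces A's bounded trial search over i=1..25 for the modular inverse of a mod 26 by a constructive extended Euclidean algorithm (with the same non-invertible fallback ani=0 arising from the gcd check).
-- outside the precondition, e.g. on unlock_methog(3, 5, ''): A raises TypeError, B raises TypeError; on unlock_methog(3, 5, 'ab'): A raises TypeError, B raises TypeError
import Mathlib
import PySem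

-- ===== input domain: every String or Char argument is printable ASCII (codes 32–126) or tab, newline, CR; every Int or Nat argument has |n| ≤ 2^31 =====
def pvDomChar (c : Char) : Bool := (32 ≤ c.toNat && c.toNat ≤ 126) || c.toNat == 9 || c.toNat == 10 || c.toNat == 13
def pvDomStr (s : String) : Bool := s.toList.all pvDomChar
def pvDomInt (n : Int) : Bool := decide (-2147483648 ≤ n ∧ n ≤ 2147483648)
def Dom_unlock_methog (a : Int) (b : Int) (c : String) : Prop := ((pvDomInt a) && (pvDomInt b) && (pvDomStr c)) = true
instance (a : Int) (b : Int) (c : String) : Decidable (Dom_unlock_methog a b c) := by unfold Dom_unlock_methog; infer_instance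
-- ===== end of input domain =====

-- B replaces A's bounded trial search for the modular inverse by the extended Euclidean
-- algorithm (alternative decomposition; same final character formula).

-- ===== PORT A =====
-- the `for i in range(1, 26): if …: ani = i; break` loop (ani stays 0 when no i matches)
def pvALoop (a : Int) : List Int → Int
  | [] => 0
  | i :: rest => if PySem.Int.mod (i * a - 1) 26 = 0 then i else pvALoop a rest

def unlock_methog (a : Int) (b : Int) (c : String) : String :=
  let ani := pvALoop a (PySem.List.pyRange 1 26 1)
  -- ord(c): exact for single-character c (Pre_ requires length 1; Python raises otherwise)
  let number := ((c.toList.headD 'a').toNat : Int) - 97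
  let result1 := PySem.Int.mod (ani * (number - b)) 26
  -- chr(result1 + 97): result1 ∈ [0,25] so this is an ASCII lowercase letter
  String.ofList [Char.ofNat (result1 + 97).toNat]

-- ===== PORT B =====
-- the `while r != 0` loop of Source B; the fuel only bounds iterations (26 always suffices
-- for the actual arguments) and does not change the computation
def pvEgcd : Nat → Int → Int → Int → Int → Int × Int
  | 0, oldr, _, olds, _ => (oldr, olds)
  | fuel + 1, oldr, r, olds, s =>
    if r = 0 then (oldr, olds)
    else
      let q := PySem.Int.floordiv oldr r
      pvEgcd fuel r (oldr - q * r) s (olds - q * s)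

def unlock_methog_alt (a : Int) (b : Int) (c : String) : String :=
  let p := pvEgcd 30 (PySem.Int.mod a 26) 26 1 0
  let ani := if p.1 = 1 then PySem.Int.mod p.2 26 else 0
  let number := ((c.toList.headD 'a').toNat : Int) - 97
  let result1 := PySem.Int.mod (ani * (number - b)) 26
  String.ofList [Char.ofNat (result1 + 97).toNat]

-- ===== PRECONDITION & SPEC =====
-- Pre_ excludes exactly the inputs where Python's ord(c) raises TypeError: c not a single character.
def Pre_unlock_methog (a : Int) (b : Int) (c : String) : Prop := c.toList.length = 1
instance (a : Int) (b : Int) (c : String) : Decidable (Pre_unlock_methog a b c) := by unfold Pre_unlock_methog; infer_instance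
def pvWitness_unlock_methog : Int × Int × String := (3, 5, "k")

def Spec_unlock_methog (a : Int) (b : Int) (c : String) (out : String) : Prop := out = unlock_methog_alt a b c
instance (a : Int) (b : Int) (c : String) (out : String) : Decidable (Spec_unlock_methog a b c out) := by unfold Spec_unlock_methog; infer_instance

-- ===== CLAIM (what is proved, stated in full; the proofs are below) =====
def Claim_equal_unlock_methog : Prop := ∀ (a : Int) (b : Int) (c : String), Dom_unlock_methog a b c → Pre_unlock_methog a b c → Spec_unlock_methog a b c (unlock_methog a b c)

-- ===== LEMMAS AND PROOFS =====

-- A's loop test depends only on a modulo 26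
theorem pvCond_congr (i a : Int) :
    (PySem.Int.mod (i * a - 1) 26 = 0) = (PySem.Int.mod (i * (PySem.Int.mod a 26) - 1) 26 = 0) := by
  rw [PySem.Int.mod_eq_emod_of_pos (a := a) (by norm_num),
      PySem.Int.mod_eq_emod_of_pos (by norm_num), PySem.Int.mod_eq_emod_of_pos (by norm_num)]
  congr 1
  conv_lhs => rw [Int.sub_emod, Int.mul_emod]
  conv_rhs => rw [Int.sub_emod, Int.mul_emod, Int.emod_emod_of_dvd a dvd_rfl]

theorem pvALoop_mod (a : Int) (l : List Int) : pvALoop a l = pvALoop (PySem.Int.mod a 26) l := by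
  induction l with
  | nil => rfl
  | cons i rest ih =>
    simp only [pvALoop, pvCond_congr i a]
    split <;> simp [ih]

-- both ways of computing the inverse agree for every residue
theorem pvAni_eq (a : Int) :
    pvALoop a (PySem.List.pyRange 1 26 1) =
      (if (pvEgcd 30 (PySem.Int.mod a 26) 26 1 0).1 = 1
       then PySem.Int.mod (pvEgcd 30 (PySem.Int.mod a 26) 26 1 0).2 26 else 0) := by
  rw [pvALoop_mod a]
  have h0 : 0 ≤ PySem.Int.mod a 26 := PySem.Int.mod_nonneg a (by norm_num)
  have h1 : PySem.Int.mod a 26 < 26 := PySem.Int.mod_lt a (by norm_num)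
  set m := PySem.Int.mod a 26 with hm
  clear_value m
  interval_cases m <;> decide

-- ===== VERDICT (by name: the statement is the Claim_ definition above) =====
theorem unlock_methog_spec : Claim_equal_unlock_methog := by
  intro a b c _ _
  unfold Spec_unlock_methog unlock_methog unlock_methog_alt
  rw [pvAni_eq a]
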